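-- pv_equiv track=rewrite | github.com/atayur03/OFCP | Hand5.py | is_valid_hand5
-- ===== SOURCE A (Python) =====
-- RANKS = "23456789TJQKA"
--
-- SUITS = "cdhs"
--
-- def is_valid_hand5(hand_str: str):
--     """Verifies if the input string represents a valid 5-card poker hand."""
--     if len(hand_str) != 10:
--         return False
--
--     parsed_cards = [hand_str[i:i+2] for i in range(0, len(hand_str), 2)]
--     if len(parsed_cards) != 5:
--         return False
--
--     for card in parsed_cards:
--         if card[0] not in RANKS or card[1] not in SUITS:
--             return False
--     return True
-- ===== SOURCE B (Python) =====
-- RANKS = "23456789TJQKA"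
--
-- SUITS = "cdhs"
--
-- def is_valid_hand5(hand_str: str):
--     """Verifies if the input string represents a valid 5-card poker hand."""
--     def match(s, n):
--         if n == 0:
--             return s == ""
--         return len(s) >= 2 and s[0] in RANKS and s[1] in SUITS and match(s[2:], n - 1)
--     return match(hand_str, 5)
-- ===== Notes on version B (the rewrite author's own statement) =====
-- stated objective: simpler
-- what changed: Replaces A's length precheck plus chunk-list construction plus validation loop with a single recursive matcher that consumes one rank/suit pair at a time, five times, and requires the remainder to be empty.
import Mathlib
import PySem

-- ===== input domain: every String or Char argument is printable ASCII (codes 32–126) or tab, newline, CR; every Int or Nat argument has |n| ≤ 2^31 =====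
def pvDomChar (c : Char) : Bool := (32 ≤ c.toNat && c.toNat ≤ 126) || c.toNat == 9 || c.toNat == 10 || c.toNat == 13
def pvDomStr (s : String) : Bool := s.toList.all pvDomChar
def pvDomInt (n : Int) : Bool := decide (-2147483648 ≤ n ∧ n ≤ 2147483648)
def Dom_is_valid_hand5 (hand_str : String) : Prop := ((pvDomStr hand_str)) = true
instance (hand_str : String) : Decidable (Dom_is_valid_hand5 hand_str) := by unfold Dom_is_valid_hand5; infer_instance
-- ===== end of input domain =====

-- B replaces A's split-into-chunks-then-loop validation with a single recursive matcher that
-- consumes one rank/suit pair at a time (objective: simpler — no length precheck, no chunk list).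

-- ===== PORT A =====
def pvRANKS : String := "23456789TJQKA"
def pvSUITS : String := "cdhs"

-- the 'for card in parsed_cards' loop; 'card[0]'/'card[1]' via pyGet? (none = IndexError,
-- unreachable under the length-10 guard, rendered as false)
def pvALoop : List (List Char) → Bool
  | [] => true
  | card :: rest =>
    match PySem.List.pyGet? card 0, PySem.List.pyGet? card 1 with
    | some c0, some c1 =>
        if ¬ (pvRANKS.toList.contains c0) ∨ ¬ (pvSUITS.toList.contains c1) then false
        else pvALoop rest
    | _, _ => false

def is_valid_hand5 (hand_str : String) : Bool :=
  if PySem.Str.len hand_str ≠ 10 then false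
  else
    let parsed_cards : List (List Char) :=
      (PySem.List.pyRange 0 (PySem.Str.len hand_str) 2).map
        (fun i => PySem.List.slice hand_str.toList (some i) (some (i + 2)))
    if parsed_cards.length ≠ 5 then false
    else pvALoop parsed_cards

-- ===== PORT B =====
-- the inner recursive 'match(s, n)' of Source B: n == 0 → s == ""; else s needs ≥ 2 chars,
-- a rank, a suit, and match(s[2:], n-1)
def pvBMatch : List Char → Nat → Bool
  | cs, 0 => cs.isEmpty
  | c0 :: c1 :: rest, n + 1 =>
      pvRANKS.toList.contains c0 && pvSUITS.toList.contains c1 && pvBMatch rest n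
  | _, _ + 1 => false

def is_valid_hand5_alt (hand_str : String) : Bool :=
  pvBMatch hand_str.toList 5

-- ===== PRECONDITION & SPEC =====
def Spec_is_valid_hand5 (hand_str : String) (out : Bool) : Prop := out = is_valid_hand5_alt hand_str
instance (hand_str : String) (out : Bool) : Decidable (Spec_is_valid_hand5 hand_str out) := by unfold Spec_is_valid_hand5; infer_instance

-- ===== CLAIM (what is proved, stated in full; the proofs are below) =====
def Claim_equal_is_valid_hand5 : Prop := ∀ (hand_str : String), Dom_is_valid_hand5 hand_str → Spec_is_valid_hand5 hand_str (is_valid_hand5 hand_str)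

-- ===== LEMMAS AND PROOFS =====

-- a successful B-match consumes exactly 2*n characters
theorem pvBMatch_length {cs : List Char} {n : Nat} (h : pvBMatch cs n = true) :
    cs.length = 2 * n := by
  induction n generalizing cs with
  | zero => cases cs <;> simp_all [pvBMatch]
  | succ n ih =>
    match cs with
    | [] => simp [pvBMatch] at h
    | [c] => simp [pvBMatch] at h
    | c0 :: c1 :: rest =>
      simp only [pvBMatch, Bool.and_eq_true] at h
      have := ih h.2
      simp [List.length_cons, this]; omega

-- ===== VERDICT (by name: the statement is the Claim_ definition above) =====
theorem is_valid_hand5_spec : Claim_equal_is_valid_hand5 := by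
  intro s _
  unfold Spec_is_valid_hand5 is_valid_hand5 is_valid_hand5_alt
  by_cases h : s.toList.length = 10
  · -- length 10: expose the ten characters and compute both sides
    match hl : s.toList, h with
    | [a0,a1,a2,a3,a4,a5,a6,a7,a8,a9], _ =>
      simp [PySem.Str.len_eq, hl, pvBMatch, PySem.List.pyRange, PySem.List.slice]
      simp [List.range_succ, PySem.List.clampIdx, pvALoop, PySem.List.pyGet?,
            PySem.List.pyIdx?, Bool.and_assoc]
  · -- length ≠ 10: A's guard fires; B's matcher fails by the length lemma
    have hb : pvBMatch s.toList 5 = false := by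
      cases hbv : pvBMatch s.toList 5 with
      | false => rfl
      | true => exact absurd (pvBMatch_length hbv) (by omega)
    rw [hb, if_pos (fun hc => h (by simp only [PySem.Str.len_eq] at hc; simpa using (by exact_mod_cast hc : s.toList.length = 10)))]
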